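-- pv_equiv track=rewrite | github.com/BharathASL/four-wheeler-edge-brain | src/conversation_memory.py | _query_tokens
-- ===== SOURCE A (Python) =====
-- from typing import Callable, Dict, List, Optional, Tuple
--
-- def _query_tokens(query: str) -> List[str]:
--     cleaned = []
--     for ch in (query or "").lower():
--         cleaned.append(ch if ch.isalnum() or ch.isspace() else " ")
--
--     words = [w for w in "".join(cleaned).split() if len(w) >= 3]
--     stop = {
--         "what",
--         "when",
--         "where",
--         "which",
--         "this",
--         "that",
--         "have",
--         "with",
--         "from",
--         "your",
--         "about",
--         "remember",
--         "remeber",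
--         "know",
--         "please",
--         "could",
--         "would",
--         "should",
--         "there",
--         "their",
--         "them",
--         "they",
--         "were",
--         "been",
--         "being",
--         "into",
--         "just",
--     }
--     prioritized = [w for w in words if w not in stop]
--     if prioritized:
--         return prioritized
--     return words
-- ===== SOURCE B (Python) =====
-- def _query_tokens(query):
--     # Single pass: build tokens directly by accumulating alphanumeric runs.
--     text = (query or "").lower()
--     tokens = []
--     buf = []
--     for ch in text:
--         if ch.isalnum():
--             buf.append(ch)
--         elif buf:
--             tokens.append("".join(buf))
--             buf = []
--     if buf:
--         tokens.append("".join(buf))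
--     words = [w for w in tokens if len(w) >= 3]
--     stop = {
--         "what", "when", "where", "which", "this", "that", "have", "with",
--         "from", "your", "about", "remember", "remeber", "know", "please",
--         "could", "would", "should", "there", "their", "them", "they",
--         "were", "been", "being", "into", "just",
--     }
--     prioritized = [w for w in words if w not in stop]
--     if prioritized:
--         return prioritized
--     return words
-- ===== Notes on version B (the rewrite author's own statement) =====
-- stated objective: alternative
-- what changed: Replaces the clean-characters/join/split pipeline with a single pass that accumulates alphanumeric runs into tokens directly, flushing the buffer at each non-alphanumeric character; the length/stopword filters and fallback are unchanged.
import Mathlib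
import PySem

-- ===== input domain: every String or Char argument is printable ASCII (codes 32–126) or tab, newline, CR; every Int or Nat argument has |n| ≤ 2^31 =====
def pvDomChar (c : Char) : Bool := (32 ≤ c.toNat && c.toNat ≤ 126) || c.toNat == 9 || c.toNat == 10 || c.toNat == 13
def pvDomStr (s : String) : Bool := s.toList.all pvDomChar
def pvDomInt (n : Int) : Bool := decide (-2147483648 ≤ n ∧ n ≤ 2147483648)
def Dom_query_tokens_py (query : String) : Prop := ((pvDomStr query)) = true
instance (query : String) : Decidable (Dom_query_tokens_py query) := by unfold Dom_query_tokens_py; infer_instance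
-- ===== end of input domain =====

-- B replaces A's clean-characters/join/split pipeline with a single pass that accumulates
-- alphanumeric runs into tokens directly (objective: alternative; same cost).

-- the stopword set literal shared verbatim by both Pythons (a Python set of strings)
def pvStopWords : PySem.Set (List Char) := PySem.Set.ofList
  ["what".toList, "when".toList, "where".toList, "which".toList, "this".toList,
   "that".toList, "have".toList, "with".toList, "from".toList, "your".toList,
   "about".toList, "remember".toList, "remeber".toList, "know".toList,
   "please".toList, "could".toList, "would".toList, "should".toList,
   "there".toList, "their".toList, "them".toList, "they".toList, "were".toList,
   "been".toList, "being".toList, "into".toList, "just".toList]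

-- ===== PORT A =====
-- the loop body of A's cleaning loop: `ch if ch.isalnum() or ch.isspace() else " "`
def pvClean (ch : Char) : Char :=
  if PySem.Chars.isalnum ch || PySem.Chars.isspace ch then ch else ' '

-- `query or ""` is the identity on str inputs (the only falsy str is "", which maps to "").
def query_tokens_py (query : String) : List String :=
  let cleaned : List Char := (PySem.Chars.lower query.toList).map pvClean
  let words : List (List Char) := (PySem.Chars.split₀ cleaned).filter (fun w => 3 ≤ w.length)
  let prioritized := words.filter (fun w => !(PySem.Set.contains pvStopWords w))
  (if !prioritized.isEmpty then prioritized else words).map String.mk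

-- ===== PORT B =====
-- one step of B's for-loop: extend the buffer on an alnum char, otherwise flush it
def altStep (st : List (List Char) × List Char) (ch : Char) : List (List Char) × List Char :=
  if PySem.Chars.isalnum ch then (st.1, st.2 ++ [ch])
  else if st.2.isEmpty then st
  else (st.1 ++ [st.2], [])

def query_tokens_py_alt (query : String) : List String :=
  let text := PySem.Chars.lower query.toList
  let st := text.foldl altStep ([], [])
  let tokens := if st.2.isEmpty then st.1 else st.1 ++ [st.2]
  let words := tokens.filter (fun w => 3 ≤ w.length)
  let prioritized := words.filter (fun w => !(PySem.Set.contains pvStopWords w))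
  (if !prioritized.isEmpty then prioritized else words).map String.mk

-- ===== PRECONDITION & SPEC =====
def Spec_query_tokens_py (query : String) (out : List String) : Prop := out = query_tokens_py_alt query
instance (query : String) (out : List String) : Decidable (Spec_query_tokens_py query out) := by unfold Spec_query_tokens_py; infer_instance

-- ===== CLAIM (what is proved, stated in full; the proofs are below) =====
def Claim_equal_query_tokens_py : Prop := ∀ (query : String), Dom_query_tokens_py query → Spec_query_tokens_py query (query_tokens_py query)

-- ===== LEMMAS AND PROOFS =====

-- forward-reading tokenizer both ports are reduced to: maximal alnum runs of the input
def pvTokAux : List Char → List Char → List (List Char)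
  | [], buf => if buf.isEmpty then [] else [buf]
  | c :: cs, buf =>
    if PySem.Chars.isalnum c then pvTokAux cs (buf ++ [c])
    else if buf.isEmpty then pvTokAux cs buf
    else buf :: pvTokAux cs []

lemma pv_isspace_of_isalnum (c : Char) (h : PySem.Chars.isalnum c = true) :
    PySem.Chars.isspace c = false := by
  simp only [PySem.Chars.isalnum, PySem.Chars.isalpha, PySem.Chars.isdigit,
    PySem.Chars.isupper, PySem.Chars.islower, Bool.or_eq_true, Bool.and_eq_true,
    decide_eq_true_eq, Char.le_def, UInt32.le_iff_toNat_le, Char.toNat_val,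
    Char.reduceToNat] at h
  simp only [PySem.Chars.isspace, Bool.or_eq_false_iff, Bool.and_eq_false_iff,
    decide_eq_false_iff_not]
  omega

lemma pv_clean_alnum (c : Char) (h : PySem.Chars.isalnum c = true) : pvClean c = c := by
  simp [pvClean, h]

lemma pv_isspace_clean (c : Char) (h : PySem.Chars.isalnum c = false) :
    PySem.Chars.isspace (pvClean c) = true := by
  unfold pvClean
  by_cases hs : PySem.Chars.isspace c = true
  · simp [h, hs]
  · simp at hs; simp [h, hs]; decide

-- A's pipeline: split() of the cleaned characters is the alnum-run tokenizer
lemma pv_split_go (cs : List Char) : ∀ (cur : List Char) (acc : List (List Char)),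
    PySem.Chars.split₀.go (cs.map pvClean) cur acc = acc.reverse ++ pvTokAux cs cur.reverse := by
  induction cs with
  | nil =>
    intro cur acc
    by_cases h : cur = []
    · subst h; simp [PySem.Chars.split₀.go, pvTokAux]
    · simp [PySem.Chars.split₀.go, pvTokAux, h]
  | cons c cs ih =>
    intro cur acc
    by_cases h : PySem.Chars.isalnum c = true
    · have hs : PySem.Chars.isspace c = false := pv_isspace_of_isalnum c h
      simp only [List.map_cons, pv_clean_alnum c h, PySem.Chars.split₀.go, hs]
      simp [ih, pvTokAux, h]
    · have h' : PySem.Chars.isalnum c = false := by simpa using h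
      have hs : PySem.Chars.isspace (pvClean c) = true := pv_isspace_clean c h'
      simp only [List.map_cons, PySem.Chars.split₀.go, hs]
      by_cases hc : cur = []
      · subst hc
        simp [ih, pvTokAux, h']
      · have hcf : cur.isEmpty = false := by simpa using hc
        simp only [hcf, Bool.false_eq_true, if_false, if_true, ih]
        simp [pvTokAux, h', hc]

-- B's loop: the fold with a final flush is the same tokenizer
lemma pv_foldl_altStep (cs : List Char) : ∀ (toks : List (List Char)) (buf : List Char),
    (let st := cs.foldl altStep (toks, buf);
     if st.2.isEmpty then st.1 else st.1 ++ [st.2]) = toks ++ pvTokAux cs buf := by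
  induction cs with
  | nil =>
    intro toks buf
    by_cases h : buf = []
    · subst h; simp [pvTokAux]
    · simp [pvTokAux, h]
  | cons c cs ih =>
    intro toks buf
    by_cases h : PySem.Chars.isalnum c = true
    · simp only [List.foldl_cons, altStep, h, if_true]
      simpa [pvTokAux, h] using ih toks (buf ++ [c])
    · have h' : PySem.Chars.isalnum c = false := by simpa using h
      by_cases hb : buf = []
      · subst hb
        simp only [List.foldl_cons, altStep, h', Bool.false_eq_true, if_false,
          List.isEmpty_nil, if_true]
        simpa [pvTokAux, h'] using ih toks []
      · have hbf : buf.isEmpty = false := by simpa using hb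
        simp only [List.foldl_cons, altStep, h', Bool.false_eq_true, if_false, hbf]
        have := ih (toks ++ [buf]) []
        simp only [this, pvTokAux, h', hbf]
        simp

-- ===== VERDICT (by name: the statement is the Claim_ definition above) =====
theorem query_tokens_py_spec : Claim_equal_query_tokens_py := by
  intro query _
  unfold Spec_query_tokens_py query_tokens_py query_tokens_py_alt
  have hA : PySem.Chars.split₀ ((PySem.Chars.lower query.toList).map pvClean)
      = pvTokAux (PySem.Chars.lower query.toList) [] := by
    simpa [PySem.Chars.split₀] using pv_split_go (PySem.Chars.lower query.toList) [] []
  have hB := pv_foldl_altStep (PySem.Chars.lower query.toList) [] []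
  simp only [List.nil_append] at hB
  simp only [hA, hB]
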